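-- pv_equiv track=rewrite | github.com/matirowensztein/practicas-ip | MATE/practica-7/Ej2.py | cerosEnPosicionesParesIn
-- ===== SOURCE A (Python) =====
-- def cerosEnPosicionesParesIn(arr: list[int]) -> list[int]:
--     res: list[int] = []
--     for i in range(len(arr)):
--         if i % 2 == 0:
--             res.append(arr[i])
--         else:
--             res.append(0)
--     return res
-- ===== SOURCE B (Python) =====
-- def cerosEnPosicionesParesIn(arr: list[int]) -> list[int]:
--     res = list(arr)
--     for i in range(1, len(res), 2):
--         res[i] = 0
--     return res
-- ===== Notes on version B (the rewrite author's own statement) =====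
-- stated objective: alternative
-- what changed: B copies the whole list once and then overwrites only the odd positions in a step-2 pass, instead of A's single parity-branching append loop over every index.
import Mathlib
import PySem

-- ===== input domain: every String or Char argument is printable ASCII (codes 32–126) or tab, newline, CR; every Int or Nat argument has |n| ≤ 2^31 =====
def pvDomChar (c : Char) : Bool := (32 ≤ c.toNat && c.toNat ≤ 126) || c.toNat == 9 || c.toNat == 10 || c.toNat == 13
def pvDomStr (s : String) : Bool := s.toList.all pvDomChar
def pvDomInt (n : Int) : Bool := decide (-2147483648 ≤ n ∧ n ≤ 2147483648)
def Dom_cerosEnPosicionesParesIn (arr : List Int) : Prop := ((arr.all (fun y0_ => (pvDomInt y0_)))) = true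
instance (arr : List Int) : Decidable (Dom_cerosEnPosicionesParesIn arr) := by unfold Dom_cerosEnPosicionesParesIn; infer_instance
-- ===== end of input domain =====

-- ===== PORT A =====
-- B copies the list and zeroes only the odd positions in a separate step-2 pass (alternative decomposition; same cost).
-- ===== PORT A =====
def cerosEnPosicionesParesIn (arr : List Int) : List Int :=
  (PySem.List.pyRange 0 (PySem.List.len arr) 1).foldl
    (fun res i =>
      if PySem.Int.mod i 2 == 0 then res ++ [PySem.List.pyGetD arr i 0]
      else res ++ [0]) []

-- ===== PORT B =====
-- 'res[i] = 0' for i in range(1, len(res), 2): every i is a nonnegative in-range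
-- index, so List.set at i.toNat is exact Python assignment semantics here.
def cerosEnPosicionesParesIn_alt (arr : List Int) : List Int :=
  (PySem.List.pyRange 1 (PySem.List.len arr) 2).foldl
    (fun res i => res.set i.toNat 0) arr

-- ===== PRECONDITION & SPEC =====
def Spec_cerosEnPosicionesParesIn (arr : List Int) (out : List Int) : Prop := out = cerosEnPosicionesParesIn_alt arr
instance (arr : List Int) (out : List Int) : Decidable (Spec_cerosEnPosicionesParesIn arr out) := by unfold Spec_cerosEnPosicionesParesIn; infer_instance

-- ===== CLAIM (what is proved, stated in full; the proofs are below) =====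
def Claim_equal_cerosEnPosicionesParesIn : Prop := ∀ (arr : List Int), Dom_cerosEnPosicionesParesIn arr → Spec_cerosEnPosicionesParesIn arr (cerosEnPosicionesParesIn arr)

-- ===== LEMMAS AND PROOFS =====

-- B's overwrite loop, pointwise: position j becomes 0 iff some index in the
-- iteration list denotes j (and j is in range); otherwise it is untouched.
theorem setfold_getElem? (l : List Int) (r : List Int) (j : Nat) :
    (l.foldl (fun r i => r.set i.toNat 0) r)[j]?
      = if ∃ i ∈ l, i.toNat = j then (if j < r.length then some 0 else none)
        else r[j]? := by
  induction l generalizing r with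
  | nil =>
    simp
  | cons i l ih =>
    rw [List.foldl_cons, ih]
    by_cases hm : ∃ i' ∈ l, i'.toNat = j
    · simp [hm, List.length_set]
    · by_cases hi : i.toNat = j
      · subst hi
        simp [hm, List.getElem?_set]
      · simp [hm, hi, List.getElem?_set]

-- A's append loop is a map over range(len(arr)).
theorem portA_eq_map (arr : List Int) :
    cerosEnPosicionesParesIn arr =
      (List.range arr.length).map
        (fun (k : Nat) => if (k : Int) % 2 = 0 then arr.getD k 0 else 0) := by
  unfold cerosEnPosicionesParesIn
  have hf : (fun (res : List Int) (i : Int) =>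
      if PySem.Int.mod i 2 == 0 then res ++ [PySem.List.pyGetD arr i 0]
      else res ++ [0])
      = fun res i => res ++ [if PySem.Int.mod i 2 == 0 then PySem.List.pyGetD arr i 0 else 0] := by
    funext res i; split <;> simp_all
  rw [hf, PySem.List.foldl_append_singleton_eq_map]
  rw [PySem.List.len_eq, PySem.List.pyRange_zero_natCast, List.map_map, List.nil_append]
  refine List.map_congr_left (fun k _ => ?_)
  by_cases hp : (k : Int) % 2 = 0
  · simp [Function.comp, hp, PySem.List.pyGetD_natCast]
  · simp [Function.comp, hp]

-- The indices range(1, n, 2) denote exactly the odd positions below n.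
theorem mem_odd_range (n j : Nat) :
    (∃ i ∈ PySem.List.pyRange 1 (n : Int) 2, i.toNat = j) ↔ (j % 2 = 1 ∧ j < n) := by
  constructor
  · rintro ⟨i, hi, rfl⟩
    rw [PySem.List.mem_pyRange_iff_of_pos (by norm_num)] at hi
    obtain ⟨h1', h2', hdvd⟩ := hi
    have hnn : ((i.toNat : Int)) = i := Int.toNat_of_nonneg (by omega)
    omega
  · rintro ⟨hodd, hlt⟩
    refine ⟨(j : Int), ?_, by simp⟩
    rw [PySem.List.mem_pyRange_iff_of_pos (by norm_num)]
    refine ⟨by omega, by omega, by omega⟩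

theorem ceros_eq (arr : List Int) :
    cerosEnPosicionesParesIn arr = cerosEnPosicionesParesIn_alt arr := by
  apply List.ext_getElem?
  intro j
  rw [portA_eq_map]
  unfold cerosEnPosicionesParesIn_alt
  rw [PySem.List.len_eq, setfold_getElem?]
  simp only [mem_odd_range]
  by_cases hj : j < arr.length
  · by_cases hodd : j % 2 = 1
    · have hnd : ¬ (2 ∣ (j : Int)) := by omega
      simp [hodd, hj, hnd]
    · have hE : (j : Int) % 2 = 0 := by omega
      simp [hodd, hj, hE, List.getD]
  · have hge : arr.length ≤ j := by omega
    have h1 : ¬ (j % 2 = 1 ∧ j < arr.length) := by omega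
    simp [h1, hge]

-- ===== VERDICT (by name: the statement is the Claim_ definition above) =====
theorem cerosEnPosicionesParesIn_spec : Claim_equal_cerosEnPosicionesParesIn := by
  intro arr _
  exact ceros_eq arr
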